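-- pv_equiv track=rewrite | github.com/XipingGong/pfas_docking | scripts/update_pdb_coord.py | merge_with_non_atoms
-- ===== SOURCE A (Python) =====
-- def merge_with_non_atoms(pdb2_lines, updated_atoms):
--     output_lines = []
--     atom_index = 0
--     for line in pdb2_lines:
--         if line.startswith(('ATOM', 'HETATM')):
--             output_lines.append(updated_atoms[atom_index])
--             atom_index += 1
--         else:
--             output_lines.append(line)
--     return output_lines
-- ===== SOURCE B (Python) =====
-- def merge_with_non_atoms(pdb2_lines, updated_atoms):
--     output_lines = list(pdb2_lines)
--     positions = [i for i, line in enumerate(pdb2_lines)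
--                  if line.startswith(('ATOM', 'HETATM'))]
--     j = 0
--     for pos in positions:
--         output_lines[pos] = updated_atoms[j]
--         j += 1
--     return output_lines
-- ===== Notes on version B (the rewrite author's own statement) =====
-- stated objective: alternative
-- what changed: A builds the output in one interleaved pass appending either the next updated atom or the original line; B copies the input, collects the indices of ATOM/HETATM lines in a separate pass, then scatter-writes updated_atoms[j] into those positions in place.
import Mathlib
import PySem

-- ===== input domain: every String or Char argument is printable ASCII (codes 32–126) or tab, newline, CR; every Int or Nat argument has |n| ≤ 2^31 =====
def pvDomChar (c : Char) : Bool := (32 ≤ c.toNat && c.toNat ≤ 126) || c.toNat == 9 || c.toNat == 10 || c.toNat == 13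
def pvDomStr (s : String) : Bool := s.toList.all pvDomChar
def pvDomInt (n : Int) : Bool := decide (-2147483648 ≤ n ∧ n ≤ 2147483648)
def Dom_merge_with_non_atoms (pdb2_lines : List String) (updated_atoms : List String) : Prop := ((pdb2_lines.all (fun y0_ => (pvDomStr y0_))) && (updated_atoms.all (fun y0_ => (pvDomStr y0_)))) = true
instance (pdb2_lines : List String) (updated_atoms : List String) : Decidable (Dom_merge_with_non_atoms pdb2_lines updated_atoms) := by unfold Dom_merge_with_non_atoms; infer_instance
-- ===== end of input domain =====

-- B replaces A's single interleaved append loop by copy + index-table + scatter write; same cost, different decomposition.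

-- line.startswith(('ATOM', 'HETATM')), shared by both sources
def pvIsAtom (line : String) : Bool :=
  PySem.Str.startswith line "ATOM" || PySem.Str.startswith line "HETATM"

-- ===== PORT A =====
def merge_with_non_atoms (pdb2_lines : List String) (updated_atoms : List String) : List String :=
  (pdb2_lines.foldl
    (fun (st : List String × Nat) line =>
      if pvIsAtom line then
        (st.1 ++ [PySem.List.pyGetD updated_atoms (st.2 : Int) ""], st.2 + 1)
      else
        (st.1 ++ [line], st.2))
    ([], 0)).1

-- ===== PORT B =====
def merge_with_non_atoms_alt (pdb2_lines : List String) (updated_atoms : List String) : List String :=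
  let positions : List Int :=
    (PySem.List.enumerate pdb2_lines 0).foldl
      (fun acc p => if pvIsAtom p.2 then acc ++ [p.1] else acc) []
  (positions.foldl
    (fun (st : List String × Nat) pos =>
      (PySem.List.pySetD st.1 pos (PySem.List.pyGetD updated_atoms (st.2 : Int) ""), st.2 + 1))
    (pdb2_lines, 0)).1

-- ===== PRECONDITION & SPEC =====
-- Pre_ excludes exactly the inputs where Python A raises IndexError: more ATOM/HETATM lines than updated atoms.
def Pre_merge_with_non_atoms (pdb2_lines : List String) (updated_atoms : List String) : Prop :=
  pdb2_lines.countP (fun l => pvIsAtom l) ≤ updated_atoms.length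
instance (pdb2_lines : List String) (updated_atoms : List String) : Decidable (Pre_merge_with_non_atoms pdb2_lines updated_atoms) := by unfold Pre_merge_with_non_atoms; infer_instance

def pvWitness_merge_with_non_atoms : List String × List String :=
  (["REMARK 1", "ATOM      1  N", "TER", "HETATM    2  O"], ["ATOM      1  N  new", "HETATM    2  O  new"])

def Spec_merge_with_non_atoms (pdb2_lines : List String) (updated_atoms : List String) (out : List String) : Prop := out = merge_with_non_atoms_alt pdb2_lines updated_atoms
instance (pdb2_lines : List String) (updated_atoms : List String) (out : List String) : Decidable (Spec_merge_with_non_atoms pdb2_lines updated_atoms out) := by unfold Spec_merge_with_non_atoms; infer_instance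

-- ===== CLAIM (what is proved, stated in full; the proofs are below) =====
def Claim_equal_merge_with_non_atoms : Prop := ∀ (pdb2_lines : List String) (updated_atoms : List String), Dom_merge_with_non_atoms pdb2_lines updated_atoms → Pre_merge_with_non_atoms pdb2_lines updated_atoms → Spec_merge_with_non_atoms pdb2_lines updated_atoms (merge_with_non_atoms pdb2_lines updated_atoms)

-- ===== LEMMAS AND PROOFS =====

-- common reference function: the merged result with atom counter starting at k
def pvGo (updated_atoms : List String) : List String → Nat → List String
  | [], _ => []
  | l :: ls, k =>
    if pvIsAtom l then PySem.List.pyGetD updated_atoms (k : Int) "" :: pvGo updated_atoms ls (k + 1)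
    else l :: pvGo updated_atoms ls k

-- the index list produced by B's comprehension, with enumerate starting at s
def pvPos : List String → Int → List Int
  | [], _ => []
  | l :: ls, s => if pvIsAtom l then s :: pvPos ls (s + 1) else pvPos ls (s + 1)

lemma foldlA_eq (upd : List String) :
    ∀ (ls acc : List String) (k : Nat),
      (ls.foldl
        (fun (st : List String × Nat) line =>
          if pvIsAtom line then
            (st.1 ++ [PySem.List.pyGetD upd (st.2 : Int) ""], st.2 + 1)
          else
            (st.1 ++ [line], st.2)) (acc, k)).1 = acc ++ pvGo upd ls k := by
  intro ls
  induction ls with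
  | nil => intro acc k; simp [pvGo]
  | cons l ls ih =>
    intro acc k
    by_cases h : pvIsAtom l = true
    · rw [List.foldl_cons]
      simp only [if_pos h]
      rw [ih (acc ++ [PySem.List.pyGetD upd (k : Int) ""]) (k + 1)]
      simp [pvGo, h]
    · rw [List.foldl_cons]
      simp only [if_neg h]
      rw [ih (acc ++ [l]) k]
      simp [pvGo, h]

lemma posFold_eq :
    ∀ (ls : List String) (s : Int) (acc : List Int),
      ((PySem.List.enumerate ls s).foldl
        (fun acc p => if pvIsAtom p.2 then acc ++ [p.1] else acc) acc) = acc ++ pvPos ls s := by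
  intro ls
  induction ls with
  | nil => intro s acc; simp [PySem.List.enumerate_nil, pvPos]
  | cons l ls ih =>
    intro s acc
    by_cases h : pvIsAtom l = true
    · simp [PySem.List.enumerate_cons, h, ih, pvPos]
    · simp [PySem.List.enumerate_cons, h, ih, pvPos]

lemma set_append_cons {α : Type} (pre : List α) (x v : α) (ls : List α) :
    (pre ++ x :: ls).set pre.length v = pre ++ v :: ls := by
  induction pre with
  | nil => rfl
  | cons a as ih => simp [ih]

lemma scatter_eq (upd : List String) :
    ∀ (ls pre : List String) (k : Nat),
      ((pvPos ls (pre.length : Int)).foldl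
        (fun (st : List String × Nat) pos =>
          (PySem.List.pySetD st.1 pos (PySem.List.pyGetD upd (st.2 : Int) ""), st.2 + 1))
        (pre ++ ls, k)).1 = pre ++ pvGo upd ls k := by
  intro ls
  induction ls with
  | nil => intro pre k; simp [pvPos, pvGo]
  | cons l ls ih =>
    intro pre k
    by_cases h : pvIsAtom l = true
    · have hp : pvPos (l :: ls) (pre.length : Int)
          = (pre.length : Int) :: pvPos ls ((pre.length : Int) + 1) := by
        simp [pvPos, h]
      have hset : PySem.List.pySetD (pre ++ l :: ls) ((pre.length : Int))
          (PySem.List.pyGetD upd (k : Int) "") =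
          pre ++ PySem.List.pyGetD upd (k : Int) "" :: ls := by
        rw [PySem.List.pySetD_natCast, set_append_cons]
      have hlen : ((pre.length : Int) + 1)
          = (((pre ++ [PySem.List.pyGetD upd (k : Int) ""]).length : Int)) := by simp
      have hsplit : pre ++ PySem.List.pyGetD upd (k : Int) "" :: ls
          = (pre ++ [PySem.List.pyGetD upd (k : Int) ""]) ++ ls := by simp
      rw [hp]
      simp only [List.foldl_cons]
      rw [hset, hlen, hsplit, ih (pre ++ [PySem.List.pyGetD upd (k : Int) ""]) (k + 1)]
      simp [pvGo, h]
    · have hp : pvPos (l :: ls) (pre.length : Int) = pvPos ls ((pre.length : Int) + 1) := by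
        simp [pvPos, h]
      have hlen : ((pre.length : Int) + 1) = (((pre ++ [l]).length : Int)) := by simp
      have hsplit : pre ++ l :: ls = (pre ++ [l]) ++ ls := by simp
      rw [hp, hlen, hsplit, ih (pre ++ [l]) k]
      simp [pvGo, h]

-- ===== VERDICT (by name: the statement is the Claim_ definition above) =====
theorem merge_with_non_atoms_spec : Claim_equal_merge_with_non_atoms := by
  intro pdb2_lines updated_atoms _ _
  unfold Spec_merge_with_non_atoms merge_with_non_atoms merge_with_non_atoms_alt
  rw [foldlA_eq updated_atoms pdb2_lines [] 0, posFold_eq pdb2_lines 0 []]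
  have := scatter_eq updated_atoms pdb2_lines [] 0
  simpa using this.symm
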